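-- pv_equiv track=rewrite | github.com/Murphy-Joe/ReWordle | helper/utils.py | pick_best_guess
-- ===== SOURCE A (Python) =====
-- def pick_best_guess(sorted_results: list[tuple[str, int]], targets_left) -> tuple[str, int]:
--     best_score = sorted_results[0][1]
--     top_item_or_items = [word_score for word_score in sorted_results if word_score[1] == best_score]
--
--     if len(top_item_or_items) == 1:
--         return top_item_or_items[0]
--     elif not any(word in targets_left for word in top_item_or_items):
--         return top_item_or_items[0]
--     else:
--         top_targets = [word for word in top_item_or_items if word in targets_left]
--         return top_targets[0]
-- ===== SOURCE B (Python) =====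
-- def pick_best_guess(sorted_results, targets_left):
--     best_score = sorted_results[0][1]
--     fallback = None
--     for item in sorted_results:
--         if item[1] == best_score:
--             if item in targets_left:
--                 return item
--             if fallback is None:
--                 fallback = item
--     return fallback
-- ===== Notes on version B (the rewrite author's own statement) =====
-- stated objective: simpler
-- what changed: A builds the list of all top-scored items and then runs a separate any-membership pass plus a second filter; B does a single pass over sorted_results with a fallback variable, returning the first top-scored item found in targets_left or else the first top-scored item.
import Mathlib
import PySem

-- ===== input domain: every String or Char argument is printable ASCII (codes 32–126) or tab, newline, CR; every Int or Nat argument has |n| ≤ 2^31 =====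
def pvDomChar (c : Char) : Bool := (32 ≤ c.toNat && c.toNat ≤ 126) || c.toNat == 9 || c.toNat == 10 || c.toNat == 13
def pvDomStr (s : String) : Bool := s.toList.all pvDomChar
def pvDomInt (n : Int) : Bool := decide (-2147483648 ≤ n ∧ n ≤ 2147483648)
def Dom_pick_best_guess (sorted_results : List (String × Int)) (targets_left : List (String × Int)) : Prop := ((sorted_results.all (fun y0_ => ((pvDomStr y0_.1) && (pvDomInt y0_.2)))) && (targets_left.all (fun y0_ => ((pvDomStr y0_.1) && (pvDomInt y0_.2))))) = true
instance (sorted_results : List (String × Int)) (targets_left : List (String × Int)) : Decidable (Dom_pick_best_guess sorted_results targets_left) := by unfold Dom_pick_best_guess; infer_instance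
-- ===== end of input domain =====

-- B collapses A's three passes (filter top, any-membership, filter targets) into one
-- fallback-carrying loop over sorted_results; objective: simpler single pass.


-- ===== PORT A =====
def pick_best_guess (sorted_results : List (String × Int)) (targets_left : List (String × Int)) : String × Int :=
  let best_score := ((PySem.List.pyGet? sorted_results 0).getD ("", 0)).2
  let top_item_or_items := sorted_results.filter (fun word_score => word_score.2 == best_score)
  if top_item_or_items.length == 1 then
    top_item_or_items.headD ("", 0)
  else if !(top_item_or_items.any (fun word => targets_left.contains word)) then
    top_item_or_items.headD ("", 0)
  else
    (top_item_or_items.filter (fun word => targets_left.contains word)).headD ("", 0)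

-- ===== PORT B =====
-- one pass: return first top-scored item found in targets_left, else the first top-scored item
def pickLoop (targets_left : List (String × Int)) (best : Int) (fallback : Option (String × Int)) : List (String × Int) → Option (String × Int)
  | [] => fallback
  | item :: rest =>
    if item.2 == best then
      if targets_left.contains item then some item
      else pickLoop targets_left best (if fallback.isNone then some item else fallback) rest
    else pickLoop targets_left best fallback rest

def pick_best_guess_alt (sorted_results : List (String × Int)) (targets_left : List (String × Int)) : String × Int :=
  let best_score := ((PySem.List.pyGet? sorted_results 0).getD ("", 0)).2
  (pickLoop targets_left best_score none sorted_results).getD ("", 0)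

-- ===== PRECONDITION & SPEC =====
-- Pre_ excludes only the empty sorted_results, on which Python A raises IndexError at sorted_results[0]
def Pre_pick_best_guess (sorted_results : List (String × Int)) (targets_left : List (String × Int)) : Prop := sorted_results ≠ []
instance (sorted_results : List (String × Int)) (targets_left : List (String × Int)) : Decidable (Pre_pick_best_guess sorted_results targets_left) := by unfold Pre_pick_best_guess; infer_instance
def pvWitness_pick_best_guess : (List (String × Int)) × (List (String × Int)) := ([("ab", 3), ("cd", 3)], [("cd", 3)])

def Spec_pick_best_guess (sorted_results : List (String × Int)) (targets_left : List (String × Int)) (out : String × Int) : Prop := out = pick_best_guess_alt sorted_results targets_left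
instance (sorted_results : List (String × Int)) (targets_left : List (String × Int)) (out : String × Int) : Decidable (Spec_pick_best_guess sorted_results targets_left out) := by unfold Spec_pick_best_guess; infer_instance

-- ===== CLAIM (what is proved, stated in full; the proofs are below) =====
def Claim_equal_pick_best_guess : Prop := ∀ (sorted_results : List (String × Int)) (targets_left : List (String × Int)), Dom_pick_best_guess sorted_results targets_left → Pre_pick_best_guess sorted_results targets_left → Spec_pick_best_guess sorted_results targets_left (pick_best_guess sorted_results targets_left)

-- ===== LEMMAS AND PROOFS =====

-- the single pass computes: first top-scored item in targets_left, else fallback, else first top-scored item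
theorem pickLoop_eq (tl : List (String × Int)) (best : Int) :
    ∀ (l : List (String × Int)) (fb : Option (String × Int)),
      pickLoop tl best fb l =
        (((l.filter (fun w => w.2 == best)).filter (fun w => tl.contains w)).head?).orElse
          (fun _ => fb.orElse (fun _ => (l.filter (fun w => w.2 == best)).head?)) := by
  intro l
  induction l with
  | nil => intro fb; simp [pickLoop]
  | cons x rest ih =>
    intro fb
    by_cases hx : (x.2 == best) = true
    · by_cases hc : tl.contains x = true
      · have hm : x ∈ tl := by simpa using hc
        simp [pickLoop, hx, hc, hm, List.filter_cons, Option.orElse]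
      · simp only [pickLoop, hx, hc, if_true, Bool.false_eq_true, if_false, ih,
          List.filter_cons, Option.orElse]
        cases fb <;> simp [hx, hc, Option.orElse] <;>
          cases ((rest.filter (fun w => w.2 == best)).filter (fun w => tl.contains w)).head? <;>
            simp [Option.orElse]
    · simp [pickLoop, hx, ih, List.filter_cons]

theorem key (sr tl : List (String × Int)) (best : Int) :
    (if ((sr.filter (fun w => w.2 == best)).length == 1) = true then
        (sr.filter (fun w => w.2 == best)).headD ("", 0)
     else if (!((sr.filter (fun w => w.2 == best)).any (fun w => tl.contains w))) = true then
        (sr.filter (fun w => w.2 == best)).headD ("", 0)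
     else ((sr.filter (fun w => w.2 == best)).filter (fun w => tl.contains w)).headD ("", 0))
      = (pickLoop tl best none sr).getD ("", 0) := by
  rw [pickLoop_eq]
  cases h : (sr.filter (fun w => w.2 == best)).filter (fun w => tl.contains w) with
  | nil =>
    have hany : ((sr.filter (fun w => w.2 == best)).any fun w => tl.contains w) = false := by
      rw [List.any_eq_false]
      intro w hw hc
      have hm : w ∈ (sr.filter (fun w => w.2 == best)).filter (fun w => tl.contains w) :=
        List.mem_filter.mpr ⟨hw, hc⟩
      rw [h] at hm
      simp at hm
    simp only [h, hany, Bool.not_false, if_true, Option.orElse, List.headD_eq_head?_getD]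
    split <;> rfl
  | cons x rest =>
    have hx : x ∈ (sr.filter (fun w => w.2 == best)).filter (fun w => tl.contains w) := by
      rw [h]; exact List.mem_cons_self
    have hxtop : x ∈ sr.filter (fun w => w.2 == best) := List.mem_of_mem_filter hx
    have hxtl : tl.contains x = true := List.of_mem_filter hx
    have hany : ((sr.filter (fun w => w.2 == best)).any fun w => tl.contains w) = true :=
      List.any_eq_true.mpr ⟨x, hxtop, hxtl⟩
    simp only [h, hany, Option.orElse, Bool.not_true]
    split
    · rename_i hlen
      simp only [beq_iff_eq, List.length_eq_one_iff] at hlen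
      obtain ⟨t, ht⟩ := hlen
      rw [ht] at hxtop
      simp only [List.mem_singleton] at hxtop
      simp [ht, hxtop, Option.getD]
    · simp [Option.getD, List.headD]

theorem pick_best_guess_spec : Claim_equal_pick_best_guess := by
  intro sr tl _ _
  unfold Spec_pick_best_guess pick_best_guess pick_best_guess_alt
  exact key sr tl ((PySem.List.pyGet? sr 0).getD ("", 0)).2
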